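-- pv_equiv track=rewrite | github.com/leba01/turnzero | turnzero/data/parser.py | _match_to_showteam
-- ===== SOURCE A (Python) =====
-- def _match_to_showteam(switch_species: str, showteam_species: list[str],
--                        used: set[int] | None = None) -> int | None:
--     """Match a switch species to its showteam index.
--
--     Tries: exact match, prefix match (either direction), base-species match.
--     """
--     skip = used or set()
--
--     # Exact
--     for i, st in enumerate(showteam_species):
--         if i not in skip and switch_species == st:
--             return i
--
--     # Prefix (handles form variants like Ogerpon-Cornerstone-Tera)
--     for i, st in enumerate(showteam_species):
--         if i in skip:
--             continue
--         if switch_species.startswith(st + "-") or st.startswith(switch_species + "-"):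
--             return i
--
--     # Base species (first hyphen segment)
--     sw_base = switch_species.split("-")[0]
--     for i, st in enumerate(showteam_species):
--         if i in skip:
--             continue
--         if st.split("-")[0] == sw_base:
--             return i
--
--     return None
-- ===== SOURCE B (Python) =====
-- def _match_to_showteam(switch_species: str, showteam_species: list[str],
--                        used: set[int] | None = None) -> int | None:
--     """Single pass: track the best (tier, index); tier 0 exact, 1 prefix, 2 base."""
--     skip = used or set()
--     best = None  # (tier, index)
--     for i, st in enumerate(showteam_species):
--         if i in skip:
--             continue
--         if switch_species == st:
--             tier = 0
--         elif switch_species.startswith(st + "-") or st.startswith(switch_species + "-"):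
--             tier = 1
--         elif st.split("-")[0] == switch_species.split("-")[0]:
--             tier = 2
--         else:
--             continue
--         if best is None or tier < best[0]:
--             best = (tier, i)
--     return None if best is None else best[1]
-- ===== Notes on version B (the rewrite author's own statement) =====
-- stated objective: simpler
-- what changed: Replaces A's three sequential prioritized scans over the list by a single pass that assigns each non-skipped index its lowest matching tier (exact/prefix/base) and keeps the minimum (tier, index).
import Mathlib
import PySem

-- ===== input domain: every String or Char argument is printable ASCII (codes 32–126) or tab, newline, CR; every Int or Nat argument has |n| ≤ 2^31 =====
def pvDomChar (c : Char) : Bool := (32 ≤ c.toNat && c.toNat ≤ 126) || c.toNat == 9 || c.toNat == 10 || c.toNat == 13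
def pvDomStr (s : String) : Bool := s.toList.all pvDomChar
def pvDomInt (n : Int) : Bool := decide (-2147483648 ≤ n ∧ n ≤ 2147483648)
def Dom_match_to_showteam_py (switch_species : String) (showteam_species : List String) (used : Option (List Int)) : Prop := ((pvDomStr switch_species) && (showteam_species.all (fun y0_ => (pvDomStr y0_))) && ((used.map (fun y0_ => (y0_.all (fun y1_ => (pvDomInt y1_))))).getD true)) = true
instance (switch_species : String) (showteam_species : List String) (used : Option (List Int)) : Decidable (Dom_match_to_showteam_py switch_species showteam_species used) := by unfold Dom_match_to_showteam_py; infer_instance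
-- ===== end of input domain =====

-- B replaces A's three sequential prioritized scans by ONE pass keeping the minimal (tier, index); objective: simpler.

-- shared small helpers (pure expressions both Pythons contain)
-- `used or set()`: an empty or None set is falsy, giving the empty skip set
def pvSkip (used : Option (List Int)) : List Int :=
  match used with
  | none => []
  | some l => if l.isEmpty then [] else l

-- st.split("-")[0]; Python split with a non-empty separator never raises and never returns an empty list, so getD/headD are exact
def pvBase (s : String) : String := String.ofList ((PySem.Chars.splitOn s.toList ['-']).headD [])

-- the three match conditions of the Python sources, verbatim
def pvP0 (sw st : String) : Bool := sw == st
def pvP1 (sw st : String) : Bool := PySem.Str.startswith sw (st ++ "-") || PySem.Str.startswith st (sw ++ "-")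
def pvP2 (sw st : String) : Bool := pvBase st == pvBase sw

-- ===== PORT A =====
-- one `for i, st in enumerate(...)` loop of A: first index i with i not in skip and cond(st)
def pvScan (skip : List Int) (p : String → Bool) : List String → Int → Option Int
  | [], _ => none
  | st :: rest, i => if !skip.contains i && p st then some i else pvScan skip p rest (i + 1)

def match_to_showteam_py (switch_species : String) (showteam_species : List String) (used : Option (List Int)) : Option Int :=
  match pvScan (pvSkip used) (fun st => pvP0 switch_species st) showteam_species 0 with
  | some i => some i
  | none =>
    match pvScan (pvSkip used) (fun st => pvP1 switch_species st) showteam_species 0 with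
    | some i => some i
    | none => pvScan (pvSkip used) (fun st => pvP2 switch_species st) showteam_species 0

-- ===== PORT B =====
-- B's if/elif chain computing this element's tier (or skipping it)
def pvTier? (sw st : String) : Option Nat :=
  if pvP0 sw st then some 0
  else if pvP1 sw st then some 1
  else if pvP2 sw st then some 2
  else none

-- B's single loop, keeping the best (tier, index) seen so far
def pvBestLoop (skip : List Int) (sw : String) : List String → Int → Option (Nat × Int) → Option (Nat × Int)
  | [], _, best => best
  | st :: rest, i, best =>
    pvBestLoop skip sw rest (i + 1)
      (if skip.contains i then best
       else
         match pvTier? sw st with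
         | none => best
         | some t =>
           match best with
           | none => some (t, i)
           | some (bt, bi) => if t < bt then some (t, i) else some (bt, bi))

def match_to_showteam_py_alt (switch_species : String) (showteam_species : List String) (used : Option (List Int)) : Option Int :=
  match pvBestLoop (pvSkip used) switch_species showteam_species 0 none with
  | none => none
  | some (_, i) => some i

-- ===== PRECONDITION & SPEC =====
def Spec_match_to_showteam_py (switch_species : String) (showteam_species : List String) (used : Option (List Int)) (out : Option Int) : Prop := out = match_to_showteam_py_alt switch_species showteam_species used
instance (switch_species : String) (showteam_species : List String) (used : Option (List Int)) (out : Option Int) : Decidable (Spec_match_to_showteam_py switch_species showteam_species used out) := by unfold Spec_match_to_showteam_py; infer_instance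

-- ===== CLAIM (what is proved, stated in full; the proofs are below) =====
def Claim_equal_match_to_showteam_py : Prop := ∀ (switch_species : String) (showteam_species : List String) (used : Option (List Int)), Dom_match_to_showteam_py switch_species showteam_species used → Spec_match_to_showteam_py switch_species showteam_species used (match_to_showteam_py switch_species showteam_species used)

-- ===== LEMMAS AND PROOFS =====

-- an accumulator of tier 0 is final
lemma bestLoop_tier0 (skip : List Int) (sw : String) (l : List String) :
    ∀ (i j : Int), pvBestLoop skip sw l i (some (0, j)) = some (0, j) := by
  induction l with
  | nil => intro i j; simp [pvBestLoop]
  | cons st rest ih =>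
    intro i j
    simp only [pvBestLoop]
    by_cases hc : i ∈ skip
    · simp only [List.contains_eq_mem, hc, decide_true, if_true]
      exact ih _ _
    · simp only [List.contains_eq_mem, hc, decide_false]
      cases h : pvTier? sw st with
      | none => exact ih _ _
      | some t => simpa using ih (i + 1) j

-- an accumulator of tier 1 is only beaten by the first exact match
lemma bestLoop_tier1 (skip : List Int) (sw : String) (l : List String) :
    ∀ (i j : Int), pvBestLoop skip sw l i (some (1, j)) =
      match pvScan skip (fun st => pvP0 sw st) l i with
      | some k => some (0, k)
      | none => some (1, j) := by
  induction l with
  | nil => intro i j; simp [pvBestLoop, pvScan]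
  | cons st rest ih =>
    intro i j
    simp only [pvBestLoop, pvScan]
    by_cases hc : i ∈ skip
    · simp only [List.contains_eq_mem, hc, decide_true, Bool.not_true, Bool.false_and, if_true]
      exact ih _ _
    · simp only [List.contains_eq_mem, hc, decide_false, Bool.not_false, Bool.true_and]
      by_cases h0 : pvP0 sw st
      · simp [pvTier?, h0, bestLoop_tier0]
      · simp only [h0, if_false, Bool.false_eq_true]
        cases h1 : pvP1 sw st
        · cases h2 : pvP2 sw st
          · simp only [pvTier?, h0, h1, h2, if_false, Bool.false_eq_true]
            exact ih _ _
          · simp only [pvTier?, h0, h1, h2, if_false, if_true, Bool.false_eq_true]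
            simpa using ih (i + 1) j
        · simp only [pvTier?, h0, h1, if_false, if_true, Bool.false_eq_true]
          simpa using ih (i + 1) j

-- an accumulator of tier 2 is beaten only by the first exact match, else the first prefix match
lemma bestLoop_tier2 (skip : List Int) (sw : String) (l : List String) :
    ∀ (i j : Int), pvBestLoop skip sw l i (some (2, j)) =
      match pvScan skip (fun st => pvP0 sw st) l i with
      | some k => some (0, k)
      | none =>
        match pvScan skip (fun st => pvP1 sw st) l i with
        | some k => some (1, k)
        | none => some (2, j) := by
  induction l with
  | nil => intro i j; simp [pvBestLoop, pvScan]
  | cons st rest ih =>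
    intro i j
    simp only [pvBestLoop, pvScan]
    by_cases hc : i ∈ skip
    · simp only [List.contains_eq_mem, hc, decide_true, Bool.not_true, Bool.false_and, if_true]
      exact ih _ _
    · simp only [List.contains_eq_mem, hc, decide_false, Bool.not_false, Bool.true_and]
      by_cases h0 : pvP0 sw st
      · simp [pvTier?, h0, bestLoop_tier0]
      · simp only [h0, if_false, Bool.false_eq_true]
        by_cases h1 : pvP1 sw st
        · simp [pvTier?, h0, h1, bestLoop_tier1]
        · simp only [h1, if_false, Bool.false_eq_true]
          cases h2 : pvP2 sw st
          · simp only [pvTier?, h0, h1, h2, if_false, Bool.false_eq_true]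
            exact ih _ _
          · simp only [pvTier?, h0, h1, h2, if_false, if_true, Bool.false_eq_true]
            simpa using ih (i + 1) j

-- empty accumulator: the single pass reproduces A's three prioritized scans
lemma bestLoop_none (skip : List Int) (sw : String) (l : List String) :
    ∀ (i : Int), pvBestLoop skip sw l i none =
      match pvScan skip (fun st => pvP0 sw st) l i with
      | some k => some (0, k)
      | none =>
        match pvScan skip (fun st => pvP1 sw st) l i with
        | some k => some (1, k)
        | none =>
          match pvScan skip (fun st => pvP2 sw st) l i with
          | some k => some (2, k)
          | none => none := by
  induction l with
  | nil => intro i; simp [pvBestLoop, pvScan]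
  | cons st rest ih =>
    intro i
    simp only [pvBestLoop, pvScan]
    by_cases hc : i ∈ skip
    · simp only [List.contains_eq_mem, hc, decide_true, Bool.not_true, Bool.false_and, if_true]
      exact ih _
    · simp only [List.contains_eq_mem, hc, decide_false, Bool.not_false, Bool.true_and]
      by_cases h0 : pvP0 sw st
      · simp [pvTier?, h0, bestLoop_tier0]
      · simp only [h0, if_false, Bool.false_eq_true]
        by_cases h1 : pvP1 sw st
        · simp [pvTier?, h0, h1, bestLoop_tier1]
        · simp only [h1, if_false, Bool.false_eq_true]
          by_cases h2 : pvP2 sw st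
          · simp [pvTier?, h0, h1, h2, bestLoop_tier2]
          · simp only [pvTier?, h0, h1, h2, if_false, Bool.false_eq_true]
            exact ih _

-- ===== VERDICT (by name: the statement is the Claim_ definition above) =====
theorem match_to_showteam_py_spec : Claim_equal_match_to_showteam_py := by
  intro sw ss used _
  unfold Spec_match_to_showteam_py match_to_showteam_py match_to_showteam_py_alt
  rw [bestLoop_none (pvSkip used) sw ss]
  cases pvScan (pvSkip used) (fun st => pvP0 sw st) ss 0 <;>
    cases pvScan (pvSkip used) (fun st => pvP1 sw st) ss 0 <;>
      cases pvScan (pvSkip used) (fun st => pvP2 sw st) ss 0 <;> rfl
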